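-- pv_equiv track=rewrite | github.com/haasonsaas/jarvis | src/jarvis/tools/services_domains/trust_memory_governance.py | _parse_simple_assertion
-- ===== SOURCE A (Python) =====
-- def _parse_simple_assertion(text: str) -> tuple[str, str] | None:
--     cleaned_chars: list[str] = []
--     for ch in str(text or "").strip().lower():
--         if ch.isalnum() or ch in {" ", "_", "-"}:
--             cleaned_chars.append(ch)
--         else:
--             cleaned_chars.append(" ")
--     normalized = " ".join("".join(cleaned_chars).split())
--     if not normalized:
--         return None
--     tokens = normalized.split()
--     if len(tokens) < 3:
--         return None
--     try:
--         predicate_index = tokens.index("is")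
--     except ValueError:
--         return None
--     if predicate_index <= 0 or predicate_index >= (len(tokens) - 1):
--         return None
--     subject = " ".join(tokens[:predicate_index]).strip()
--     remainder = tokens[predicate_index + 1 :]
--     polarity_prefix = "yes:"
--     if remainder and remainder[0] == "not":
--         polarity_prefix = "not:"
--         remainder = remainder[1:]
--     value = " ".join(remainder).strip()
--     if len(subject) < 2 or len(subject) > 80 or not value or len(value) > 80:
--         return None
--     return subject, f"{polarity_prefix}{value}"
-- ===== SOURCE B (Python) =====
-- def _parse_simple_assertion(text):
--     # One-pass tokenizer: token chars are kept directly, everything else separates;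
--     # then a single scan splits the tokens at the first "is".
--     tokens = []
--     cur = ""
--     for ch in str(text or "").strip().lower():
--         if ch.isalnum() or ch in "_-":
--             cur += ch
--         else:
--             if cur:
--                 tokens.append(cur)
--             cur = ""
--     if cur:
--         tokens.append(cur)
--     before = []
--     after = None
--     for tok in tokens:
--         if after is None:
--             if tok == "is":
--                 after = []
--             else:
--                 before.append(tok)
--         else:
--             after.append(tok)
--     if after is None or not before or not after:
--         return None
--     if after[0] == "not":
--         prefix, vals = "not:", after[1:]
--     else:
--         prefix, vals = "yes:", after
--     subject = " ".join(before)
--     value = " ".join(vals)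
--     if len(subject) < 2 or len(subject) > 80 or not value or len(value) > 80:
--         return None
--     return subject, prefix + value
-- ===== Notes on version B (the rewrite author's own statement) =====
-- stated objective: simpler
-- what changed: Replaces A's clean-every-char-to-space / join / whitespace-split / tokens.index / slice pipeline by a single-pass tokenizer that emits tokens directly and one scan that splits the token list at the first 'is'; no normalized string is ever built and no strip of subject/value is needed.
import Mathlib
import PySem

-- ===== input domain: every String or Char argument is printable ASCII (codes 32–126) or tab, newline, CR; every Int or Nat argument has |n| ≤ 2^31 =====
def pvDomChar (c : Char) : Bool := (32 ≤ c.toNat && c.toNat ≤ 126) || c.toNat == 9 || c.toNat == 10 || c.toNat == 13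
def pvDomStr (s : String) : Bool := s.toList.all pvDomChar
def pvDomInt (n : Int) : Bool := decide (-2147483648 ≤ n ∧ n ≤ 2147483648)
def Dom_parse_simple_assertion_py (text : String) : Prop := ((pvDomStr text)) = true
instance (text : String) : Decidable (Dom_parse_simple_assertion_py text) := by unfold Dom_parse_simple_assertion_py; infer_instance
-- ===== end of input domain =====

-- B replaces A's clean-every-char / re-join / split / tokens.index pipeline by a single-pass
-- tokenizer plus one scan that splits the token list at the first "is" (objective: simpler decomposition).

-- ===== PORT A =====
def parse_simple_assertion_py (text : String) : Option (String × String) :=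
  -- for ch in str(text or "").strip().lower(): append ch or " "
  let cleaned : List Char :=
    (PySem.Chars.lower (PySem.Chars.strip text.toList)).foldl
      (fun acc ch =>
        if PySem.Chars.isalnum ch || (ch == ' ' || ch == '_' || ch == '-') then acc ++ [ch]
        else acc ++ [' ']) []
  let normalized : List Char := PySem.Chars.join [' '] (PySem.Chars.split₀ cleaned)
  if normalized.isEmpty then none
  else
    let tokens : List (List Char) := PySem.Chars.split₀ normalized
    if tokens.length < 3 then none
    else
      match PySem.List.index? tokens "is".toList with
      | none => none
      | some predicate_index =>
        if predicate_index ≤ 0 || predicate_index ≥ tokens.length - 1 then none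
        else
          let subject := PySem.Chars.strip (PySem.Chars.join [' '] (tokens.take predicate_index))
          let remainder := tokens.drop (predicate_index + 1)
          let pr : List Char × List (List Char) :=
            match remainder with
            | r0 :: rest => if r0 == "not".toList then ("not:".toList, rest) else ("yes:".toList, remainder)
            | [] => ("yes:".toList, remainder)
          let value := PySem.Chars.strip (PySem.Chars.join [' '] pr.2)
          if subject.length < 2 || subject.length > 80 || value.isEmpty || value.length > 80 then none
          else some (String.ofList subject, String.ofList (pr.1 ++ value))

-- ===== PORT B =====
def pvTokChar (c : Char) : Bool := PySem.Chars.isalnum c || c == '_' || c == '-'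

def parse_simple_assertion_py_alt (text : String) : Option (String × String) :=
  let st :=
    (PySem.Chars.lower (PySem.Chars.strip text.toList)).foldl
      (fun (st : List (List Char) × List Char) ch =>
        if pvTokChar ch then (st.1, st.2 ++ [ch])
        else if st.2.isEmpty then st else (st.1 ++ [st.2], [])) ([], [])
  let tokens : List (List Char) := if st.2.isEmpty then st.1 else st.1 ++ [st.2]
  let ba :=
    tokens.foldl
      (fun (ba : List (List Char) × Option (List (List Char))) tok =>
        match ba.2 with
        | none => if tok == "is".toList then (ba.1, some []) else (ba.1 ++ [tok], none)
        | some a => (ba.1, some (a ++ [tok]))) ([], none)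
  match ba.2 with
  | none => none
  | some after =>
    if ba.1.isEmpty || after.isEmpty then none
    else
      let pr : List Char × List (List Char) :=
        match after with
        | r0 :: rest => if r0 == "not".toList then ("not:".toList, rest) else ("yes:".toList, after)
        | [] => ("yes:".toList, after)
      let subject := PySem.Chars.join [' '] ba.1
      let value := PySem.Chars.join [' '] pr.2
      if subject.length < 2 || subject.length > 80 || value.isEmpty || value.length > 80 then none
      else some (String.ofList subject, String.ofList (pr.1 ++ value))

-- ===== PRECONDITION & SPEC =====
def Spec_parse_simple_assertion_py (text : String) (out : Option (String × String)) : Prop := out = parse_simple_assertion_py_alt text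
instance (text : String) (out : Option (String × String)) : Decidable (Spec_parse_simple_assertion_py text out) := by unfold Spec_parse_simple_assertion_py; infer_instance

-- ===== CLAIM (what is proved, stated in full; the proofs are below) =====
def Claim_equal_parse_simple_assertion_py : Prop := ∀ (text : String), Dom_parse_simple_assertion_py text → Spec_parse_simple_assertion_py text (parse_simple_assertion_py text)

-- ===== LEMMAS AND PROOFS =====

def pvClean (c : Char) : Char :=
  if PySem.Chars.isalnum c || (c == ' ' || c == '_' || c == '-') then c else ' '

theorem pv_alnum_not_space (c : Char) (h : PySem.Chars.isalnum c = true) :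
    PySem.Chars.isspace c = false := by
  revert h
  unfold PySem.Chars.isalnum PySem.Chars.isalpha PySem.Chars.isdigit PySem.Chars.isupper PySem.Chars.islower PySem.Chars.isspace
  simp only [Char.le_def, UInt32.le_iff_toNat_le, Char.toNat, Bool.or_eq_true, Bool.and_eq_true,
    decide_eq_true_eq, Bool.or_eq_false_iff, Bool.and_eq_false_iff, decide_eq_false_iff_not]
  have hA : 'A'.val.toNat = 65 := rfl
  have hZ : 'Z'.val.toNat = 90 := rfl
  have ha : 'a'.val.toNat = 97 := rfl
  have hz : 'z'.val.toNat = 122 := rfl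
  have h0 : '0'.val.toNat = 48 := rfl
  have h9 : '9'.val.toNat = 57 := rfl
  intro h
  simp only [hA, hZ, ha, hz, h0, h9] at h
  constructor <;> try constructor
  all_goals omega

theorem pvClean_spec (c : Char) :
    PySem.Chars.isspace (pvClean c) = !pvTokChar c ∧ (pvTokChar c = true → pvClean c = c) := by
  unfold pvClean pvTokChar
  by_cases h : PySem.Chars.isalnum c = true
  · simp [h, pv_alnum_not_space c h]
  · rcases eq_or_ne c '_' with rfl | h1
    · exact ⟨by decide, fun _ => by decide⟩
    · rcases eq_or_ne c '-' with rfl | h2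
      · exact ⟨by decide, fun _ => by decide⟩
      · rcases eq_or_ne c ' ' with rfl | h3
        · exact ⟨by decide, fun hh => by revert hh; decide⟩
        · have e1 : (c == '_') = false := beq_eq_false_iff_ne.mpr h1
          have e2 : (c == '-') = false := beq_eq_false_iff_ne.mpr h2
          have e3 : (c == ' ') = false := beq_eq_false_iff_ne.mpr h3
          simp [h, e1, e2, e3]
          decide

def pvNS (c : Char) : Bool := !PySem.Chars.isspace c

def pvTok (q : Char → Bool) : List Char → List (List Char)
  | [] => []
  | c :: rest =>
    if q c then (c :: rest.takeWhile q) :: pvTok q (rest.dropWhile q)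
    else pvTok q rest
termination_by l => l.length
decreasing_by
  · exact Nat.lt_succ_of_le (List.length_dropWhile_le q rest)
  · simp

theorem split0_go_spec (l : List Char) : ∀ (cur : List Char) (accs : List (List Char)),
    PySem.Chars.split₀.go l cur accs =
      accs.reverse ++ (if cur.isEmpty then pvTok pvNS l
        else (cur.reverse ++ l.takeWhile pvNS) :: pvTok pvNS (l.dropWhile pvNS)) := by
  induction l with
  | nil =>
    intro cur accs
    by_cases hc : cur.isEmpty
    · simp [PySem.Chars.split₀.go, hc, pvTok]
    · simp [PySem.Chars.split₀.go, hc, pvTok]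
  | cons c rest ih =>
    intro cur accs
    by_cases hs : PySem.Chars.isspace c
    · have hq : pvNS c = false := by simp [pvNS, hs]
      by_cases hc : cur.isEmpty
      · rw [show PySem.Chars.split₀.go (c :: rest) cur accs = PySem.Chars.split₀.go rest [] accs by
          simp [PySem.Chars.split₀.go, hs, hc]]
        rw [ih [] accs]
        simp [hc, pvTok, hq]
      · rw [show PySem.Chars.split₀.go (c :: rest) cur accs
              = PySem.Chars.split₀.go rest [] (cur.reverse :: accs) by
          simp [PySem.Chars.split₀.go, hs, hc]]
        rw [ih [] (cur.reverse :: accs)]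
        simp [hc, pvTok, hq]
    · have hq : pvNS c = true := by simp [pvNS, hs]
      rw [show PySem.Chars.split₀.go (c :: rest) cur accs = PySem.Chars.split₀.go rest (c :: cur) accs by
          simp [PySem.Chars.split₀.go, hs]]
      rw [ih (c :: cur) accs]
      by_cases hc : cur.isEmpty
      · have : cur = [] := by simpa [List.isEmpty_iff] using hc
        subst this
        simp [pvTok, hq]
      · simp [hc, hq]

theorem split₀_eq_pvTok (l : List Char) : PySem.Chars.split₀ l = pvTok pvNS l := by
  simp [PySem.Chars.split₀, split0_go_spec]

theorem pv_takeWhile_map (l : List Char) :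
    (l.map pvClean).takeWhile pvNS = l.takeWhile pvTokChar := by
  induction l with
  | nil => simp
  | cons c rest ih =>
    obtain ⟨h1, h2⟩ := pvClean_spec c
    have hp : pvNS (pvClean c) = pvTokChar c := by simp [pvNS, h1]
    by_cases hq : pvTokChar c = true
    · have hpc : pvClean c = c := h2 hq
      have hns : pvNS c = true := by rw [← hpc, hp]; exact hq
      simp [hns, hq, hpc, ih]
    · simp only [Bool.not_eq_true] at hq
      simp [hp, hq]

theorem pv_dropWhile_map (l : List Char) :
    (l.map pvClean).dropWhile pvNS = (l.dropWhile pvTokChar).map pvClean := by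
  induction l with
  | nil => simp
  | cons c rest ih =>
    obtain ⟨h1, h2⟩ := pvClean_spec c
    have hp : pvNS (pvClean c) = pvTokChar c := by simp [pvNS, h1]
    by_cases hq : pvTokChar c = true
    · have hpc : pvClean c = c := h2 hq
      have hns : pvNS c = true := by rw [← hpc, hp]; exact hq
      simp [hns, hq, hpc, ih]
    · simp only [Bool.not_eq_true] at hq
      simp [hp, hq]

theorem pvTok_map_clean (l : List Char) : pvTok pvNS (l.map pvClean) = pvTok pvTokChar l := by
  induction hn : l.length using Nat.strong_induction_on generalizing l with
  | _ n ih =>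
    match l with
    | [] => simp [pvTok]
    | c :: rest =>
      obtain ⟨h1, h2⟩ := pvClean_spec c
      have hp : pvNS (pvClean c) = pvTokChar c := by simp [pvNS, h1]
      by_cases hq : pvTokChar c = true
      · have hpc : pvClean c = c := h2 hq
        have hns : pvNS c = true := by rw [← hpc, hp]; exact hq
        have := ih ((rest.dropWhile pvTokChar).length) (by
          subst hn; exact Nat.lt_succ_of_le (List.length_dropWhile_le _ _)) _ rfl
        rw [List.map_cons, hpc, pvTok, pvTok]
        simp [hns, hq, pv_takeWhile_map, pv_dropWhile_map, this]
      · simp only [Bool.not_eq_true] at hq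
        rw [List.map_cons, pvTok, pvTok]
        simp only [hp, hq, if_neg, Bool.false_eq_true, not_false_iff]
        exact ih rest.length (by subst hn; simp) _ rfl

theorem pvTok_words (q : Char → Bool) (l : List Char) :
    ∀ w ∈ pvTok q l, w ≠ [] ∧ ∀ c ∈ w, q c = true := by
  induction hn : l.length using Nat.strong_induction_on generalizing l with
  | _ n ih =>
    match l with
    | [] => simp [pvTok]
    | c :: rest =>
      rw [pvTok]
      by_cases hq : q c = true
      · rw [if_pos hq]
        intro w hw
        rcases List.mem_cons.mp hw with rfl | hw'
        · refine ⟨by simp, ?_⟩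
          intro d hd
          rcases List.mem_cons.mp hd with rfl | hd'
          · exact hq
          · exact List.mem_takeWhile_imp hd'
        · exact ih ((rest.dropWhile q).length)
            (by subst hn; exact Nat.lt_succ_of_le (List.length_dropWhile_le _ _)) _ rfl w hw'
      · rw [if_neg hq]
        exact ih rest.length (by subst hn; simp) _ rfl

theorem pvTok_all (q : Char → Bool) (l : List Char) (h : ∀ c ∈ l, q c = true) (hne : l ≠ []) :
    pvTok q l = [l] := by
  match l with
  | c :: rest =>
    rw [pvTok, if_pos (h c (by simp))]
    have ht : rest.takeWhile q = rest := List.takeWhile_eq_self_iff.mpr (fun d hd => h d (by simp [hd]))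
    have hd : rest.dropWhile q = [] := List.dropWhile_eq_nil_iff.mpr (fun d hd => h d (by simp [hd]))
    rw [ht, hd]
    simp [pvTok]

theorem pvTok_intercalate (ws : List (List Char))
    (h : ∀ w ∈ ws, w ≠ [] ∧ ∀ c ∈ w, pvNS c = true) :
    pvTok pvNS (PySem.Chars.join [' '] ws) = ws := by
  induction ws with
  | nil => simp [PySem.Chars.join_nil, pvTok]
  | cons w rest ih =>
    match rest with
    | [] =>
      rw [PySem.Chars.join_singleton]
      obtain ⟨hne, hall⟩ := h w (by simp)
      exact pvTok_all _ _ hall hne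
    | v :: rest' =>
      rw [PySem.Chars.join_cons_cons]
      obtain ⟨hne, hall⟩ := h w (by simp)
      match w with
      | c :: cs =>
        have hq : pvNS c = true := hall c (by simp)
        have hsp : pvNS ' ' = false := by decide
        have htk : cs.takeWhile pvNS = cs :=
          List.takeWhile_eq_self_iff.mpr (fun e he => hall e (List.mem_cons_of_mem _ he))
        have hdw : cs.dropWhile pvNS = [] :=
          List.dropWhile_eq_nil_iff.mpr (fun e he => hall e (List.mem_cons_of_mem _ he))
        rw [List.cons_append, List.cons_append, pvTok, if_pos hq]
        have ht : (cs ++ [' '] ++ PySem.Chars.join [' '] (v :: rest')).takeWhile pvNS = cs := by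
          rw [List.append_assoc, List.takeWhile_append, htk]
          simp [hsp]
        have hd : (cs ++ [' '] ++ PySem.Chars.join [' '] (v :: rest')).dropWhile pvNS
            = ' ' :: PySem.Chars.join [' '] (v :: rest') := by
          rw [List.append_assoc, List.dropWhile_append, hdw]
          simp [hsp]
        rw [ht, hd, pvTok, if_neg (by simp [hsp])]
        rw [ih (fun u hu => h u (by simp [hu]))]

theorem pv_join_ne_nil (v : List Char) (rest : List (List Char)) (hv : v ≠ []) :
    PySem.Chars.join [' '] (v :: rest) ≠ [] := by
  match rest with
  | [] => rw [PySem.Chars.join_singleton]; exact hv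
  | u :: rest' =>
    rw [PySem.Chars.join_cons_cons]
    match v with
    | c :: cs => simp

theorem pv_rstrip_join (ws : List (List Char))
    (h : ∀ w ∈ ws, w ≠ [] ∧ ∀ c ∈ w, pvNS c = true) :
    PySem.Chars.rstrip (PySem.Chars.join [' '] ws) = PySem.Chars.join [' '] ws := by
  induction ws with
  | nil => simp [PySem.Chars.join_nil, PySem.Chars.rstrip]
  | cons w rest ih =>
    match rest with
    | [] =>
      rw [PySem.Chars.join_singleton]
      obtain ⟨hne, hall⟩ := h w (by simp)
      unfold PySem.Chars.rstrip
      rw [List.dropWhile_eq_self_iff.mpr ?_]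
      · simp
      · intro hl
        have hm : w.reverse[0] ∈ w := by
          have := List.getElem_mem hl
          simp only [List.mem_reverse] at this
          exact this
        have := hall _ hm
        simp [pvNS] at this
        simp [this]
    | v :: rest' =>
      rw [PySem.Chars.join_cons_cons]
      have ihr := ih (fun u hu => h u (by simp [hu]))
      have hjne : PySem.Chars.join [' '] (v :: rest') ≠ [] :=
        pv_join_ne_nil v rest' (h v (by simp)).1
      unfold PySem.Chars.rstrip at ihr ⊢
      have hrne : (List.dropWhile PySem.Chars.isspace
          (PySem.Chars.join [' '] (v :: rest')).reverse) ≠ [] := by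
        intro hnil
        rw [hnil] at ihr
        exact hjne (by simpa using ihr)
      have hdw : List.dropWhile PySem.Chars.isspace (PySem.Chars.join [' '] (v :: rest')).reverse
          = (PySem.Chars.join [' '] (v :: rest')).reverse := by
        have := congrArg List.reverse ihr
        simpa using this
      rw [show (w ++ [' '] ++ PySem.Chars.join [' '] (v :: rest')).reverse
            = (PySem.Chars.join [' '] (v :: rest')).reverse ++ (' ' :: w.reverse) by simp]
      rw [List.dropWhile_append, if_neg (by simpa [List.isEmpty_iff] using hrne), hdw]
      simp

theorem pv_strip_join (ws : List (List Char))
    (h : ∀ w ∈ ws, w ≠ [] ∧ ∀ c ∈ w, pvNS c = true) :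
    PySem.Chars.strip (PySem.Chars.join [' '] ws) = PySem.Chars.join [' '] ws := by
  unfold PySem.Chars.strip
  have hl : PySem.Chars.lstrip (PySem.Chars.join [' '] ws) = PySem.Chars.join [' '] ws := by
    match ws with
    | [] => simp [PySem.Chars.join_nil, PySem.Chars.lstrip]
    | w :: rest =>
      obtain ⟨hne, hall⟩ := h w (by simp)
      match w with
      | c :: cs =>
        have hc : PySem.Chars.isspace c = false := by
          have := hall c (by simp); simpa [pvNS] using this
        match rest with
        | [] =>
          rw [PySem.Chars.join_singleton]
          simp [PySem.Chars.lstrip, hc]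
        | v :: rest' =>
          rw [PySem.Chars.join_cons_cons]
          simp [PySem.Chars.lstrip, hc]
  rw [hl, pv_rstrip_join ws h]

-- B's tokenizer fold computes pvTok.
theorem pv_bfold (l : List Char) : ∀ (toks : List (List Char)) (cur : List Char),
    (let st := l.foldl
        (fun (st : List (List Char) × List Char) ch =>
          if pvTokChar ch then (st.1, st.2 ++ [ch])
          else if st.2.isEmpty then st else (st.1 ++ [st.2], [])) (toks, cur)
     if st.2.isEmpty then st.1 else st.1 ++ [st.2]) =
      toks ++ (if cur.isEmpty then pvTok pvTokChar l
        else (cur ++ l.takeWhile pvTokChar) :: pvTok pvTokChar (l.dropWhile pvTokChar)) := by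
  induction l with
  | nil =>
    intro toks cur
    by_cases hc : cur.isEmpty <;> simp [hc, pvTok]
  | cons c rest ih =>
    intro toks cur
    by_cases hq : pvTokChar c = true
    · simp only [List.foldl_cons, if_pos hq]
      rw [ih toks (cur ++ [c])]
      by_cases hc : cur.isEmpty
      · have : cur = [] := List.isEmpty_iff.mp hc
        subst this
        simp [pvTok, hq]
      · simp [hc, hq]
    · simp only [Bool.not_eq_true] at hq
      by_cases hc : cur.isEmpty
      · simp only [List.foldl_cons, hq, if_neg, hc, if_pos, Bool.false_eq_true, not_false_iff]
        rw [ih toks cur]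
        simp [hc, pvTok, hq]
      · simp only [List.foldl_cons, hq, Bool.false_eq_true, if_false, hc, if_false]
        rw [ih (toks ++ [cur]) []]
        simp [pvTok, hq]

-- B's splitting fold: accumulator already past "is".
theorem pv_ba_some (toks : List (List Char)) : ∀ (pre : List (List Char)) (a : List (List Char)),
    toks.foldl
      (fun (ba : List (List Char) × Option (List (List Char))) tok =>
        match ba.2 with
        | none => if tok == "is".toList then (ba.1, some []) else (ba.1 ++ [tok], none)
        | some a => (ba.1, some (a ++ [tok]))) (pre, some a) = (pre, some (a ++ toks)) := by
  induction toks with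
  | nil => intro pre a; simp
  | cons t ts ih => intro pre a; simpa using ih pre (a ++ [t])

theorem pv_ba_none (toks : List (List Char)) : ∀ (pre : List (List Char)),
    toks.foldl
      (fun (ba : List (List Char) × Option (List (List Char))) tok =>
        match ba.2 with
        | none => if tok == "is".toList then (ba.1, some []) else (ba.1 ++ [tok], none)
        | some a => (ba.1, some (a ++ [tok]))) (pre, none) =
      (match List.idxOf? "is".toList toks with
       | none => (pre ++ toks, none)
       | some i => (pre ++ toks.take i, some (toks.drop (i + 1)))) := by
  induction toks with
  | nil => intro pre; simp
  | cons t ts ih =>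
    intro pre
    by_cases ht : t == "is".toList
    · simp only [List.foldl_cons, ht, if_pos]
      rw [pv_ba_some]
      rw [List.idxOf?_cons, if_pos ht]
      simp
    · simp only [List.foldl_cons, ht, Bool.false_eq_true, if_false]
      rw [ih (pre ++ [t])]
      rw [List.idxOf?_cons]
      simp only [ht, Bool.false_eq_true, if_false]
      cases hix : List.idxOf? "is".toList ts with
      | none => simp
      | some i => simp [List.take_succ_cons, List.drop_succ_cons]

theorem pv_tok_ns (c : Char) (h : pvTokChar c = true) : pvNS c = true := by
  obtain ⟨h1, h2⟩ := pvClean_spec c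
  rw [h2 h, h] at h1
  simp [pvNS, h1]

def pvCommon (toks : List (List Char)) : Option (String × String) :=
  match List.idxOf? "is".toList toks with
  | none => none
  | some i =>
    if i = 0 ∨ i + 1 = toks.length then none
    else
      let subject := PySem.Chars.join [' '] (toks.take i)
      let pr : List Char × List (List Char) :=
        match toks.drop (i + 1) with
        | r0 :: rest => if r0 == "not".toList then ("not:".toList, rest)
                        else ("yes:".toList, toks.drop (i + 1))
        | [] => ("yes:".toList, toks.drop (i + 1))
      let value := PySem.Chars.join [' '] pr.2
      if subject.length < 2 || subject.length > 80 || value.isEmpty || value.length > 80 then none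
      else some (String.ofList subject, String.ofList (pr.1 ++ value))

theorem pv_A_eval (text : String) :
    parse_simple_assertion_py text
      = pvCommon (pvTok pvTokChar (PySem.Chars.lower (PySem.Chars.strip text.toList))) := by
  simp only [parse_simple_assertion_py]
  have hclean : (PySem.Chars.lower (PySem.Chars.strip text.toList)).foldl
      (fun acc ch =>
        if PySem.Chars.isalnum ch || (ch == ' ' || ch == '_' || ch == '-') then acc ++ [ch]
        else acc ++ [' ']) []
      = (PySem.Chars.lower (PySem.Chars.strip text.toList)).map pvClean := by
    have hf : (fun (acc : List Char) ch =>
        if PySem.Chars.isalnum ch || (ch == ' ' || ch == '_' || ch == '-') then acc ++ [ch]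
        else acc ++ [' ']) = (fun acc ch => acc ++ [pvClean ch]) := by
      funext acc ch
      by_cases h : (PySem.Chars.isalnum ch || (ch == ' ' || ch == '_' || ch == '-')) = true
      · simp only [h, if_pos]; simp [pvClean, h]
      · simp only [Bool.not_eq_true] at h; simp [pvClean, h]
    rw [hf, PySem.List.foldl_append_singleton_eq_map]
    simp
  rw [hclean, split₀_eq_pvTok, pvTok_map_clean]
  have hwq := pvTok_words pvTokChar (PySem.Chars.lower (PySem.Chars.strip text.toList))
  have hw : ∀ w ∈ pvTok pvTokChar (PySem.Chars.lower (PySem.Chars.strip text.toList)),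
      w ≠ [] ∧ ∀ c ∈ w, pvNS c = true := fun w hmem =>
    ⟨(hwq w hmem).1, fun c hc => pv_tok_ns c ((hwq w hmem).2 c hc)⟩
  cases htk : pvTok pvTokChar (PySem.Chars.lower (PySem.Chars.strip text.toList)) with
  | nil => simp [PySem.Chars.join_nil, pvCommon]
  | cons w rest =>
    rw [htk] at hw
    have hjne : PySem.Chars.join [' '] (w :: rest) ≠ [] :=
      pv_join_ne_nil w rest (hw w (by simp)).1
    rw [if_neg (by simpa [List.isEmpty_iff] using hjne)]
    rw [split₀_eq_pvTok, pvTok_intercalate _ hw]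
    have hidx : PySem.List.index? (w :: rest) ("is".toList) = List.idxOf? "is".toList (w :: rest) := rfl
    rw [hidx]
    by_cases hlen : (w :: rest).length < 3
    · rw [if_pos hlen]
      cases hix : List.idxOf? "is".toList (w :: rest) with
      | none => simp only [pvCommon, hix]
      | some i =>
        obtain ⟨hilt, -, -⟩ := List.idxOf?_eq_some_iff.mp hix
        have hg : i = 0 ∨ i + 1 = (w :: rest).length := by
          simp only [List.length_cons] at hilt hlen ⊢
          omega
        simp only [pvCommon, hix]
        rw [if_pos hg]
    · rw [if_neg hlen]
      split
      next hix => simp only [pvCommon, hix]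
      next i hix =>
        obtain ⟨hilt, -, -⟩ := List.idxOf?_eq_some_iff.mp hix
        by_cases hg : i = 0 ∨ i + 1 = (w :: rest).length
        · have hgb : (i ≤ 0 || i ≥ (w :: rest).length - 1) = true := by
            simp only [List.length_cons] at hg ⊢
            rcases hg with rfl | hg
            · simp
            · simp
              omega
          rw [if_pos hgb]
          simp only [pvCommon, hix]
          rw [if_pos hg]
        · have hgb : (i ≤ 0 || i ≥ (w :: rest).length - 1) = false := by
            rw [not_or] at hg
            simp only [List.length_cons] at hg hilt ⊢
            simp only [Bool.or_eq_false_iff, decide_eq_false_iff_not]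
            omega
          simp only [hgb, Bool.false_eq_true, if_false]
          have hsub : PySem.Chars.strip (PySem.Chars.join [' '] ((w :: rest).take i))
              = PySem.Chars.join [' '] ((w :: rest).take i) :=
            pv_strip_join _ (fun u hu => hw u (List.mem_of_mem_take hu))
          rw [hsub]
          simp only [pvCommon, hix]
          rw [if_neg hg]
          cases hdrop : (w :: rest).drop (i + 1) with
          | nil => rfl
          | cons r0 rest2 =>
            have hvals : ∀ u ∈ r0 :: rest2, u ≠ [] ∧ ∀ c ∈ u, pvNS c = true := by
              intro u hu
              exact hw u (List.mem_of_mem_drop (hdrop ▸ hu))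
            by_cases hnot : (r0 == "not".toList) = true
            · simp only [hnot, if_pos]
              have hval : PySem.Chars.strip (PySem.Chars.join [' '] rest2)
                  = PySem.Chars.join [' '] rest2 :=
                pv_strip_join _ (fun u hu => hvals u (by simp [hu]))
              rw [hval]
            · simp only [hnot, Bool.false_eq_true, if_false]
              have hval : PySem.Chars.strip (PySem.Chars.join [' '] (r0 :: rest2))
                  = PySem.Chars.join [' '] (r0 :: rest2) :=
                pv_strip_join _ hvals
              rw [hval]

theorem pv_B_eval (text : String) :
    parse_simple_assertion_py_alt text
      = pvCommon (pvTok pvTokChar (PySem.Chars.lower (PySem.Chars.strip text.toList))) := by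
  simp only [parse_simple_assertion_py_alt]
  have htoks := pv_bfold (PySem.Chars.lower (PySem.Chars.strip text.toList)) [] []
  simp only [List.isEmpty_nil, if_true, List.nil_append] at htoks
  rw [htoks]
  rw [pv_ba_none]
  cases hix : List.idxOf? "is".toList (pvTok pvTokChar (PySem.Chars.lower (PySem.Chars.strip text.toList))) with
  | none => simp only [pvCommon, hix]
  | some i =>
    set toks := pvTok pvTokChar (PySem.Chars.lower (PySem.Chars.strip text.toList)) with hts
    obtain ⟨hilt, -, -⟩ := List.idxOf?_eq_some_iff.mp hix
    have hne : toks ≠ [] := by intro h; rw [h] at hilt; simp at hilt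
    by_cases hg : i = 0 ∨ i + 1 = toks.length
    · have hie : (toks.take i).isEmpty || (toks.drop (i + 1)).isEmpty := by
        rcases hg with rfl | hg
        · simp
        · have : toks.drop (i + 1) = [] := List.drop_eq_nil_iff.mpr (by omega)
          simp [this]
      simp only [List.nil_append, hie, if_true, pvCommon, hix]
      simp [hg]
    · have hi0 : i ≠ 0 := fun h => hg (Or.inl h)
      have hi1 : i + 1 ≠ toks.length := fun h => hg (Or.inr h)
      have ht1 : (toks.take i).isEmpty = false := by
        have h1 : toks.take i ≠ [] := by
          intro h
          rcases List.take_eq_nil_iff.mp h with h0 | h0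
          · exact hi0 h0
          · exact hne h0
        simpa [List.isEmpty_iff] using h1
      have ht2 : (toks.drop (i + 1)).isEmpty = false := by
        have h1 : toks.drop (i + 1) ≠ [] := by
          intro h
          have := List.drop_eq_nil_iff.mp h
          omega
        simpa [List.isEmpty_iff] using h1
      simp only [List.nil_append, ht1, ht2, Bool.or_self, Bool.false_eq_true, if_false, pvCommon, hix]
      rw [if_neg hg]
      rfl
-- ===== VERDICT (by name: the statement is the Claim_ definition above) =====
theorem parse_simple_assertion_py_spec : Claim_equal_parse_simple_assertion_py := by
  intro text _
  unfold Spec_parse_simple_assertion_py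
  rw [pv_A_eval, pv_B_eval]
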